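-- pv_equiv track=rewrite | github.com/calico/shorkie-paper | src/shorkie_lm/2_repeat_region_masking/4_cmp_masked_regions.py | find_masked_regions
-- ===== SOURCE A (Python) =====
-- def find_masked_regions(original_seq, masked_seq):
--     masked_regions = []
--     in_masked_region = False
--     start = 0
--     for i in range(len(original_seq)):
--         if original_seq[i] != masked_seq[i]:
--             if not in_masked_region:
--                 in_masked_region = True
--                 start = i
--         else:
--             if in_masked_region:
--                 in_masked_region = False
--                 masked_regions.append((start, i))
--     if in_masked_region:
--         masked_regions.append((start, len(original_seq)))
--     return masked_regions
-- ===== SOURCE B (Python) =====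
-- def find_masked_regions(original_seq, masked_seq):
--     # precompute the difference signal, then scan it run by run
--     diffs = [original_seq[i] != masked_seq[i] for i in range(len(original_seq))]
--     regions = []
--     pos = 0
--     n = len(diffs)
--     while pos < n:
--         end = pos + 1
--         while end < n and diffs[end] == diffs[pos]:
--             end += 1
--         if diffs[pos]:
--             regions.append((pos, end))
--         pos = end
--     return regions
-- ===== Notes on version B (the rewrite author's own statement) =====
-- stated objective: alternative
-- what changed: B precomputes the boolean difference signal and then scans it run-by-run (each run consumed at once), instead of A's single pass with an in-region flag and a remembered start.
-- outside the precondition, e.g. on find_masked_regions('ab', 'a'): A raises IndexError, B raises IndexError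
import Mathlib
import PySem

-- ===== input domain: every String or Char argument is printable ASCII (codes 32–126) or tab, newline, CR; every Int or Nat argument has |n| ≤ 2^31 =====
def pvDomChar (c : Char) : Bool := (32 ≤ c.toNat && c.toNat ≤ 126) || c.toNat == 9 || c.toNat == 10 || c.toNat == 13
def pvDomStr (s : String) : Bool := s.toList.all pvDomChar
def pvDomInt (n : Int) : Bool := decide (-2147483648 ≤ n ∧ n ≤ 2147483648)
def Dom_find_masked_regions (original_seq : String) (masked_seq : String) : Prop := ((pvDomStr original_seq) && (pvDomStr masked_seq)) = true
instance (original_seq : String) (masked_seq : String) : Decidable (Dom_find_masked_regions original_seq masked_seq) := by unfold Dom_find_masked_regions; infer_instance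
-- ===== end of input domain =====

-- B replaces A's single flagged pass by precomputing the difference signal and scanning it run by run (objective: alternative decomposition, same cost).

-- ===== PORT A =====
-- A's loop body: state = (masked_regions, in_masked_region, start); f i = (original_seq[i] != masked_seq[i])
def pvStepA (f : Int → Bool) (s : List (Int × Int) × Bool × Int) (i : Int) :
    List (Int × Int) × Bool × Int :=
  if f i then
    if !s.2.1 then (s.1, true, i) else s
  else
    if s.2.1 then (s.1 ++ [(s.2.2, i)], false, s.2.2) else s

-- A's trailing 'if in_masked_region: append (start, len(original_seq))'
def pvFinA (n : Int) (s : List (Int × Int) × Bool × Int) : List (Int × Int) :=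
  if s.2.1 then s.1 ++ [(s.2.2, n)] else s.1

-- pyGetD's default ' ' is never reached under Pre_ (every index 0 ≤ i < len(original) is in range for both strings)
def find_masked_regions (original_seq : String) (masked_seq : String) : List (Int × Int) :=
  let oc := original_seq.toList
  let mc := masked_seq.toList
  let n : Int := (oc.length : Int)
  pvFinA n ((PySem.List.pyRange 0 n 1).foldl
    (pvStepA (fun i => PySem.List.pyGetD oc i ' ' != PySem.List.pyGetD mc i ' '))
    ([], false, 0))

-- ===== PORT B =====
-- Source B's outer while: consume one run of equal booleans at a time (inner 'while' = takeWhile/dropWhile)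
def pvGroupRuns : List Bool → Int → List (Int × Int)
  | [], _ => []
  | b :: rest, pos =>
    let len : Int := 1 + ((rest.takeWhile (· == b)).length : Int)
    if b then (pos, pos + len) :: pvGroupRuns (rest.dropWhile (· == b)) (pos + len)
    else pvGroupRuns (rest.dropWhile (· == b)) (pos + len)
termination_by d _ => d.length
decreasing_by
  · exact Nat.lt_succ_of_le (List.length_dropWhile_le _ _)
  · exact Nat.lt_succ_of_le (List.length_dropWhile_le _ _)

def find_masked_regions_alt (original_seq : String) (masked_seq : String) : List (Int × Int) :=
  let oc := original_seq.toList
  let mc := masked_seq.toList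
  let n : Int := (oc.length : Int)
  let diffs := (PySem.List.pyRange 0 n 1).map
    (fun i => PySem.List.pyGetD oc i ' ' != PySem.List.pyGetD mc i ' ')
  pvGroupRuns diffs 0

-- ===== PRECONDITION & SPEC =====
-- Pre_ excludes exactly the inputs where Python raises IndexError (masked_seq shorter than original_seq); both A and B raise there.
def Pre_find_masked_regions (original_seq : String) (masked_seq : String) : Prop :=
  original_seq.toList.length ≤ masked_seq.toList.length
instance (original_seq : String) (masked_seq : String) : Decidable (Pre_find_masked_regions original_seq masked_seq) := by unfold Pre_find_masked_regions; infer_instance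
def pvWitness_find_masked_regions : String × String := ("abcd", "axcy")

def Spec_find_masked_regions (original_seq : String) (masked_seq : String) (out : List (Int × Int)) : Prop := out = find_masked_regions_alt original_seq masked_seq
instance (original_seq : String) (masked_seq : String) (out : List (Int × Int)) : Decidable (Spec_find_masked_regions original_seq masked_seq out) := by unfold Spec_find_masked_regions; infer_instance

-- ===== CLAIM (what is proved, stated in full; the proofs are below) =====
def Claim_equal_find_masked_regions : Prop := ∀ (original_seq : String) (masked_seq : String), Dom_find_masked_regions original_seq masked_seq → Pre_find_masked_regions original_seq masked_seq → Spec_find_masked_regions original_seq masked_seq (find_masked_regions original_seq masked_seq)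

-- ===== LEMMAS AND PROOFS =====

-- B's state while inside a run of Trues that started at st
def pvGrIn (st : Int) (d : List Bool) (pos : Int) : List (Int × Int) :=
  let t : Int := ((d.takeWhile (· == true)).length : Int)
  (st, pos + t) :: pvGroupRuns (d.dropWhile (· == true)) (pos + t)

lemma gr_false (rest : List Bool) (pos : Int) :
    pvGroupRuns (false :: rest) pos = pvGroupRuns rest (pos + 1) := by
  cases rest with
  | nil => simp [pvGroupRuns]
  | cons c r =>
    cases c with
    | true => simp [pvGroupRuns, List.takeWhile, List.dropWhile]
    | false =>
      simp only [pvGroupRuns, List.takeWhile, List.dropWhile]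
      norm_num
      congr 1
      ring

lemma gr_true (rest : List Bool) (pos : Int) :
    pvGroupRuns (true :: rest) pos = pvGrIn pos rest (pos + 1) := by
  simp only [pvGroupRuns, pvGrIn]
  norm_num
  constructor
  · ring
  · congr 1; ring

lemma grIn_true (st : Int) (rest : List Bool) (pos : Int) :
    pvGrIn st (true :: rest) pos = pvGrIn st rest (pos + 1) := by
  simp only [pvGrIn, List.takeWhile, List.dropWhile]
  norm_num
  constructor
  · ring
  · congr 1; ring

lemma grIn_false (st : Int) (rest : List Bool) (pos : Int) :
    pvGrIn st (false :: rest) pos = (st, pos) :: pvGroupRuns rest (pos + 1) := by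
  simp only [pvGrIn, List.takeWhile, List.dropWhile]
  norm_num
  exact gr_false rest pos

-- main invariant: the flagged fold over consecutive indices equals the run-scan of the mapped signal
lemma main_inv (f : Int → Bool) (n : Int) :
    ∀ (j : Nat) (k : Int), k + j = n → ∀ (acc : List (Int × Int)) (st : Int),
      (pvFinA n ((PySem.List.pyRange k n 1).foldl (pvStepA f) (acc, false, st))
        = acc ++ pvGroupRuns ((PySem.List.pyRange k n 1).map f) k)
      ∧ (pvFinA n ((PySem.List.pyRange k n 1).foldl (pvStepA f) (acc, true, st))
        = acc ++ pvGrIn st ((PySem.List.pyRange k n 1).map f) k) := by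
  intro j
  induction j with
  | zero =>
    intro k hk acc st
    have h : PySem.List.pyRange k n 1 = [] := PySem.List.pyRange_one_eq_nil (by omega)
    simp [h, pvFinA, pvGroupRuns, pvGrIn]
    omega
  | succ j ih =>
    intro k hk acc st
    have hkn : k < n := by omega
    rw [PySem.List.pyRange_one_cons hkn]
    have ih' := ih (k + 1) (by push_cast at hk ⊢; omega)
    by_cases hf : f k
    · constructor
      · simp only [List.foldl_cons, List.map_cons, pvStepA, hf, if_pos, Bool.not_false]
        rw [gr_true]
        exact (ih' acc k).2
      · simp only [List.foldl_cons, List.map_cons, pvStepA, hf, if_pos, Bool.not_true]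
        norm_num
        rw [grIn_true]
        exact (ih' acc st).2
    · simp only [Bool.not_eq_true] at hf
      constructor
      · simp only [List.foldl_cons, List.map_cons, pvStepA, hf]
        norm_num
        rw [gr_false]
        exact (ih' acc st).1
      · simp only [List.foldl_cons, List.map_cons, pvStepA, hf]
        norm_num
        rw [grIn_false]
        have h := (ih' (acc ++ [(st, k)]) st).1
        simpa using h

-- ===== VERDICT (by name: the statement is the Claim_ definition above) =====
theorem find_masked_regions_spec : Claim_equal_find_masked_regions := by
  intro o m _ _
  unfold Spec_find_masked_regions find_masked_regions find_masked_regions_alt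
  simp only []
  have h := (main_inv (fun i => PySem.List.pyGetD o.toList i ' ' != PySem.List.pyGetD m.toList i ' ')
      ((o.toList.length : Int)) o.toList.length 0 (by omega) [] 0).1
  simpa using h
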